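-- pv_equiv track=rewrite | github.com/matthewjpyates/sparseintegers | spintegers/py/sparseMod.py | greaterThan
-- ===== SOURCE A (Python) =====
-- def greaterThan(a,b):
--     if(len(a)==0):
--         return False
--     if(len(b)==0):
--         return True
--     if(a[len(a)-1]>b[len(b)-1]):
--         return True
--     if(a[len(a)-1]<b[len(b)-1]):
--                 return False
--     if(len(b)>len(a)):
--         shortLen = len(a)
--     else:
--         shortLen = len(b)
--     for ii in range(1,shortLen+1):
--         if(a[len(a)-ii]!=b[len(b)- ii]):
--             return a[len(a)-ii]>b[len(b)-ii]
--     return len(a)>len(b)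
-- ===== SOURCE B (Python) =====
-- def greaterThan(a, b):
--     return a[::-1] > b[::-1]
-- ===== Notes on version B (the rewrite author's own statement) =====
-- stated objective: simpler
-- what changed: Replaced the explicit index scan from the most-significant end (plus empty-list guards and length tiebreak) with Python's built-in lexicographic comparison of the two reversed lists, which covers all cases in one expression.
import Mathlib
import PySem

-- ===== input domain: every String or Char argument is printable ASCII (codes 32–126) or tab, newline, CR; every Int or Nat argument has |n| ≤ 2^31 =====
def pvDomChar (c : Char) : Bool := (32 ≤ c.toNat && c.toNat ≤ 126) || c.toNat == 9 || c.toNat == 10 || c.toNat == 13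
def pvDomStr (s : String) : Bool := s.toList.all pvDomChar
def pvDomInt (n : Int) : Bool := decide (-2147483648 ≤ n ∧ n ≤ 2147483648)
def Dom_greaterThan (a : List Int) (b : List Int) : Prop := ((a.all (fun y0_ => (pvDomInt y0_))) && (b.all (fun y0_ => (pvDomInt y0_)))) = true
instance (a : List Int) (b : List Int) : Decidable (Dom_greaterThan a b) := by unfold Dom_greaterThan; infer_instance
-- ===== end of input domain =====

-- B replaces A's explicit index scan from the most-significant end (with empty guards and
-- length tiebreak) by a lexicographic comparison of the two reversed lists; objective: simpler.

-- ===== PORT A =====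
-- the 'for ii in range(1, shortLen+1)' loop with its early return
def gtLoop (a : List Int) (b : List Int) (short : Nat) (ii : Nat) : Bool :=
  if ii ≤ short then
    let x := PySem.List.pyGetD a ((a.length : Int) - (ii : Int)) 0
    let y := PySem.List.pyGetD b ((b.length : Int) - (ii : Int)) 0
    if x ≠ y then decide (x > y) else gtLoop a b short (ii + 1)
  else
    decide (a.length > b.length)
termination_by short + 1 - ii

def greaterThan (a : List Int) (b : List Int) : Bool :=
  if a.length = 0 then false
  else if b.length = 0 then true
  else if PySem.List.pyGetD a ((a.length : Int) - 1) 0 > PySem.List.pyGetD b ((b.length : Int) - 1) 0 then true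
  else if PySem.List.pyGetD a ((a.length : Int) - 1) 0 < PySem.List.pyGetD b ((b.length : Int) - 1) 0 then false
  else
    let short := if b.length > a.length then a.length else b.length
    gtLoop a b short 1

-- ===== PORT B =====
-- Python's built-in lexicographic '>' on lists of ints
def pyListGt : List Int → List Int → Bool
  | _ :: _, [] => true
  | [], _ => false
  | x :: xs, y :: ys => if x > y then true else if x < y then false else pyListGt xs ys

def greaterThan_alt (a : List Int) (b : List Int) : Bool :=
  pyListGt a.reverse b.reverse

-- ===== PRECONDITION & SPEC =====
def Spec_greaterThan (a : List Int) (b : List Int) (out : Bool) : Prop := out = greaterThan_alt a b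
instance (a : List Int) (b : List Int) (out : Bool) : Decidable (Spec_greaterThan a b out) := by unfold Spec_greaterThan; infer_instance

-- ===== CLAIM (what is proved, stated in full; the proofs are below) =====
def Claim_equal_greaterThan : Prop := ∀ (a : List Int) (b : List Int), Dom_greaterThan a b → Spec_greaterThan a b (greaterThan a b)

-- ===== LEMMAS AND PROOFS =====

theorem pyListGt_nil_left (l : List Int) : pyListGt [] l = false := by
  cases l <;> rfl

theorem pyListGt_cons_nil (x : Int) (xs : List Int) : pyListGt (x :: xs) [] = true := rfl

theorem pyListGt_cons_cons (x y : Int) (xs ys : List Int) :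
    pyListGt (x :: xs) (y :: ys)
      = if x > y then true else if x < y then false else pyListGt xs ys := rfl

-- the if-chains of the two programs agree at one position
theorem step_eq (x y : Int) (r s : Bool) (hrs : r = s) :
    (if x ≠ y then decide (x > y) else r)
      = (if x > y then true else if x < y then false else s) := by
  rcases lt_trichotomy x y with h | h | h
  · rw [if_pos (ne_of_lt h), if_neg (not_lt_of_gt h), if_pos h]
    exact decide_eq_false (not_lt_of_gt h)
  · rw [if_neg (not_not_intro h), h, if_neg (lt_irrefl y), if_neg (lt_irrefl y)]
    exact hrs
  · rw [if_pos (ne_of_gt h), if_pos h]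
    exact decide_eq_true h

-- the scan from position ii computes the lexicographic comparison of the reversed suffixes
theorem gtLoop_eq (a b : List Int) (n ii : Nat) (h1 : 1 ≤ ii)
    (h2 : ii ≤ min a.length b.length + 1)
    (hn : n = min a.length b.length + 1 - ii) :
    gtLoop a b (min a.length b.length) ii
      = pyListGt (a.reverse.drop (ii - 1)) (b.reverse.drop (ii - 1)) := by
  induction n generalizing ii with
  | zero =>
    have hii : ii = min a.length b.length + 1 := by omega
    rw [gtLoop]
    simp only [if_neg (by omega : ¬ ii ≤ min a.length b.length)]
    subst hii
    rcases Nat.le_total a.length b.length with h | h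
    · have ha : a.reverse.drop (min a.length b.length + 1 - 1) = [] := by
        apply List.drop_eq_nil_of_le; simp; omega
      rw [ha, pyListGt_nil_left]
      exact decide_eq_false (by omega)
    · by_cases heq : a.length = b.length
      · have ha : a.reverse.drop (min a.length b.length + 1 - 1) = [] := by
          apply List.drop_eq_nil_of_le; simp; omega
        have hb : b.reverse.drop (min a.length b.length + 1 - 1) = [] := by
          apply List.drop_eq_nil_of_le; simp; omega
        rw [ha, hb, pyListGt_nil_left]
        exact decide_eq_false (by omega)
      · have hlt : b.length < a.length := by omega
        have hb : b.reverse.drop (min a.length b.length + 1 - 1) = [] := by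
          apply List.drop_eq_nil_of_le; simp; omega
        have hd : min a.length b.length + 1 - 1 < a.reverse.length := by simp; omega
        rw [hb, List.drop_eq_getElem_cons hd, pyListGt_cons_nil]
        exact decide_eq_true (by omega)
  | succ m ih =>
    have hii : ii ≤ min a.length b.length := by omega
    have hia : ii - 1 < a.reverse.length := by simp; omega
    have hib : ii - 1 < b.reverse.length := by simp; omega
    rw [gtLoop]
    simp only [if_pos hii]
    have hxa : PySem.List.pyGetD a ((a.length : Int) - (ii : Int)) 0
        = a.reverse[ii - 1] := by
      have hc : ((a.length : Int) - (ii : Int)) = ((a.length - ii : Nat) : Int) := by omega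
      rw [hc, PySem.List.pyGetD_natCast, List.getElem_reverse]
      rw [List.getD_eq_getElem _ _ (by omega)]
      congr 1; omega
    have hxb : PySem.List.pyGetD b ((b.length : Int) - (ii : Int)) 0
        = b.reverse[ii - 1] := by
      have hc : ((b.length : Int) - (ii : Int)) = ((b.length - ii : Nat) : Int) := by omega
      rw [hc, PySem.List.pyGetD_natCast, List.getElem_reverse]
      rw [List.getD_eq_getElem _ _ (by omega)]
      congr 1; omega
    rw [hxa, hxb]
    rw [List.drop_eq_getElem_cons hia, List.drop_eq_getElem_cons hib]
    have hstep : ii - 1 + 1 = ii := by omega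
    rw [hstep, pyListGt_cons_cons]
    have hrec := ih (ii + 1) (by omega) (by omega) (by omega)
    have hstep2 : ii + 1 - 1 = ii := by omega
    rw [hstep2] at hrec
    exact step_eq _ _ _ _ hrec

-- ===== VERDICT (by name: the statement is the Claim_ definition above) =====
theorem greaterThan_spec : Claim_equal_greaterThan := by
  intro a b _
  unfold Spec_greaterThan greaterThan greaterThan_alt
  by_cases ha : a.length = 0
  · have h0 : a = [] := List.eq_nil_of_length_eq_zero ha
    subst h0
    rw [if_pos (show ([] : List Int).length = 0 from rfl), List.reverse_nil, pyListGt_nil_left]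
  · simp only [if_neg ha]
    by_cases hb : b.length = 0
    · have h0 : b = [] := List.eq_nil_of_length_eq_zero hb
      subst h0
      rw [if_pos (show ([] : List Int).length = 0 from rfl)]
      obtain ⟨x, t, hx⟩ : ∃ x t, a.reverse = x :: t := by
        cases h : a.reverse with
        | nil => exact absurd (by simpa using congrArg List.length h) (by simpa using ha)
        | cons x t => exact ⟨x, t, rfl⟩
      rw [List.reverse_nil, hx, pyListGt_cons_nil]
    · simp only [if_neg hb]
      have hia : (0:Nat) < a.reverse.length := by simp; omega
      have hib : (0:Nat) < b.reverse.length := by simp; omega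
      have hxa : PySem.List.pyGetD a ((a.length : Int) - 1) 0 = a.reverse[0] := by
        have hc : ((a.length : Int) - 1) = ((a.length - 1 : Nat) : Int) := by omega
        rw [hc, PySem.List.pyGetD_natCast, List.getElem_reverse]
        rw [List.getD_eq_getElem _ _ (by omega)]
        congr 1
      have hxb : PySem.List.pyGetD b ((b.length : Int) - 1) 0 = b.reverse[0] := by
        have hc : ((b.length : Int) - 1) = ((b.length - 1 : Nat) : Int) := by omega
        rw [hc, PySem.List.pyGetD_natCast, List.getElem_reverse]
        rw [List.getD_eq_getElem _ _ (by omega)]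
        congr 1
      rw [hxa, hxb]
      have hra : a.reverse = a.reverse[0] :: a.reverse.drop 1 := by
        rw [← List.drop_eq_getElem_cons hia, List.drop_zero]
      have hrb : b.reverse = b.reverse[0] :: b.reverse.drop 1 := by
        rw [← List.drop_eq_getElem_cons hib, List.drop_zero]
      have hshort : (if b.length > a.length then a.length else b.length)
          = min a.length b.length := by split_ifs with h <;> omega
      rcases lt_trichotomy (a.reverse[0]) (b.reverse[0]) with h | h | h
      · conv_rhs => rw [hra, hrb, pyListGt_cons_cons]
        rw [if_neg (not_lt_of_gt h), if_pos h, if_neg (not_lt_of_gt h), if_pos h]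
      · rw [h]
        simp only [gt_iff_lt, lt_self_iff_false, if_false, hshort]
        have hmain := gtLoop_eq a b (min a.length b.length) 1 (by omega) (by omega) (by omega)
        simp only [Nat.sub_self, List.drop_zero] at hmain
        rw [hmain]
      · conv_rhs => rw [hra, hrb, pyListGt_cons_cons]
        rw [if_pos h, if_pos h]
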